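-- pv_equiv track=rewrite | github.com/desaiharsh/18742-Project | fpga/mnist/to_image.py | conv_kernel
-- ===== SOURCE A (Python) =====
-- kernel_size = 5
--
-- dim = 28
--
-- def conv_kernel(image_stream):
--     buffer = [0] * (dim*(kernel_size-1) + kernel_size)
--     output = []
--     for pixel in image_stream:
--         conv = sum([
--             buffer[0*28 + 0] * -1,
--             buffer[1*28 + 1] * -2,
--             buffer[2*28 + 2] * 6,
--             buffer[3*28 + 3] * -2,
--             buffer[4*28 + 4] * -1,
--         ])
--         # conv_out = max(
--         #     min(
--         #         conv,
--         #         255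
--         #     ),
--         #     0
--         # )
--         conv = 255 if conv > 255 else conv;
--         conv_out = 0 if conv < 0 else conv;
--
--         # conv_out = (buffer[2*28 + 2] * 6) % 256\
--         #     - (buffer[1*28 + 1] << 1) % 256\
--         #     - (buffer[3*28 + 3] << 1) % 256\
--         #     - (buffer[0*28 + 0]) % 256\
--         #     - (buffer[4*28 + 4]) % 256
--
--         # conv_out = buffer[-1] * -1
--
--         conv_out = conv_out % 256
--
--         output += [conv_out]
--
--         for i in range(len(buffer)-1):
--             buffer[i] = buffer[i+1]
--
--         buffer[-1] = pixel
--
--     return output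
-- ===== SOURCE B (Python) =====
-- def conv_kernel(image_stream):
--     # direct offset lookups into the stored stream instead of a shifted window buffer
--     p = list(image_stream)
--
--     def g(i):
--         return p[i] if i >= 0 else 0
--
--     out = []
--     for t in range(len(p)):
--         conv = -g(t - 117) - 2 * g(t - 88) + 6 * g(t - 59) - 2 * g(t - 30) - g(t - 1)
--         out.append(min(max(conv, 0), 255))
--     return out
-- ===== Notes on version B (the rewrite author's own statement) =====
-- stated objective: faster
-- what changed: Replaces A's 117-slot shift-register buffer (with an inner 116-step shift loop per pixel) by direct fixed-offset lookups into the materialised stream, and the clamp-then-%256 by a plain min/max clamp.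
import Mathlib
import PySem

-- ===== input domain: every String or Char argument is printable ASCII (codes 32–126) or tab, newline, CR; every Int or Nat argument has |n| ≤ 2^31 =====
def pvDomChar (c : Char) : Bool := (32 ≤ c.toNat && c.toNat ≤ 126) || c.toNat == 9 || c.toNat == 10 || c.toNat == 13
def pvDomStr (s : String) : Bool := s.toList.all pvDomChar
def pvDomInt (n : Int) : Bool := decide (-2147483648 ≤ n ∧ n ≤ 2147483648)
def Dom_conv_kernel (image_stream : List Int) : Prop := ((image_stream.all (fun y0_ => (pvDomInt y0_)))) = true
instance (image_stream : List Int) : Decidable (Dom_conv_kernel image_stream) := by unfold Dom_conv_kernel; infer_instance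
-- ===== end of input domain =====

-- B replaces A's 117-slot shift-register buffer (with its per-pixel 116-step shift loop) by
-- direct fixed-offset lookups into the materialised stream (measured faster by a constant factor).

-- ===== PORT A =====
-- one iteration of A's 'for pixel in image_stream' loop over the state (buffer, output);
-- buffer keeps length 117, so the fixed indices 0,29,58,87,116 and i+1 ≤ 116 are always
-- in range and pyGetD/pySetD are exact for Python's buffer[...] reads and writes
def convAStep (st : List Int × List Int) (pixel : Int) : List Int × List Int :=
  let buffer := st.1
  let output := st.2
  let conv := ([PySem.List.pyGetD buffer (0*28 + 0) 0 * (-1),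
                PySem.List.pyGetD buffer (1*28 + 1) 0 * (-2),
                PySem.List.pyGetD buffer (2*28 + 2) 0 * 6,
                PySem.List.pyGetD buffer (3*28 + 3) 0 * (-2),
                PySem.List.pyGetD buffer (4*28 + 4) 0 * (-1)]).sum
  let conv := if conv > 255 then 255 else conv
  let conv_out := if conv < 0 then 0 else conv
  let conv_out := PySem.Int.mod conv_out 256
  let output := output ++ [conv_out]
  let buffer := (PySem.List.pyRange 0 (PySem.List.len buffer - 1) 1).foldl
    (fun b i => PySem.List.pySetD b i (PySem.List.pyGetD b (i + 1) 0)) buffer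
  let buffer := PySem.List.pySetD buffer (-1) pixel
  (buffer, output)

def conv_kernel (image_stream : List Int) : List Int :=
  (image_stream.foldl convAStep (List.replicate (28*(5-1) + 5) 0, [])).2

-- ===== PORT B =====
-- B's helper g: p[i] if i >= 0 else 0; every call site has i < len(p), so pyGetD is exact
def altG (p : List Int) (i : Int) : Int :=
  if 0 ≤ i then PySem.List.pyGetD p i 0 else 0

def altConv (p : List Int) (t : Int) : Int :=
  -altG p (t - 117) - 2 * altG p (t - 88) + 6 * altG p (t - 59)
    - 2 * altG p (t - 30) - altG p (t - 1)

def conv_kernel_alt (image_stream : List Int) : List Int :=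
  (PySem.List.pyRange 0 (PySem.List.len image_stream) 1).foldl
    (fun out t => out ++ [min (max (altConv image_stream t) 0) 255]) []

-- ===== PRECONDITION & SPEC =====
def Spec_conv_kernel (image_stream : List Int) (out : List Int) : Prop := out = conv_kernel_alt image_stream
instance (image_stream : List Int) (out : List Int) : Decidable (Spec_conv_kernel image_stream out) := by unfold Spec_conv_kernel; infer_instance

-- ===== CLAIM (what is proved, stated in full; the proofs are below) =====
def Claim_equal_conv_kernel : Prop := ∀ (image_stream : List Int), Dom_conv_kernel image_stream → Spec_conv_kernel image_stream (conv_kernel image_stream)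

-- ===== LEMMAS AND PROOFS =====

lemma shiftFold_aux (b : List Int) (j : Nat) (hj : j + 1 ≤ b.length) :
    (PySem.List.pyRange 0 (j : Int) 1).foldl
      (fun c i => PySem.List.pySetD c i (PySem.List.pyGetD c (i + 1) 0)) b
    = (b.drop 1).take j ++ b.drop j := by
  induction j with
  | zero => simp [PySem.List.pyRange_one_eq_nil]
  | succ j ih =>
    have hj' : j + 1 ≤ b.length := Nat.le_of_succ_le hj
    have h1 : ((j + 1 : Nat) : Int) = (j : Int) + 1 := by push_cast; ring
    rw [h1, PySem.List.pyRange_one_succ_right (by exact_mod_cast Nat.zero_le j),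
        List.foldl_append, ih hj']
    simp only [List.foldl_cons, List.foldl_nil]
    have hp : ((b.drop 1).take j).length = j := by simp; omega
    have hget : PySem.List.pyGetD ((b.drop 1).take j ++ b.drop j) ((j : Int) + 1) 0
        = b[j + 1]'(by omega) := by
      rw [show ((j : Int) + 1) = ((j + 1 : Nat) : Int) by push_cast; ring,
          PySem.List.pyGetD_natCast, List.getD_eq_getElem _ _ (by simp; omega)]
      rw [List.getElem_append_right (by omega)]
      simp only [List.getElem_drop]
      congr 1
      simp; omega
    rw [hget, show ((j : Int)) = ((j : Nat) : Int) by rfl, PySem.List.pySetD_natCast]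
    apply List.ext_getElem
    · simp; omega
    intro i hi1 hi2
    simp only [List.getElem_set]
    by_cases hij : j = i
    · subst hij
      rw [if_pos rfl, List.getElem_append_left (by simp; omega), List.getElem_take,
          List.getElem_drop]
      congr 1
      omega
    · rw [if_neg hij]
      rcases Nat.lt_or_ge i j with hlt | hge
      · rw [List.getElem_append_left (by omega), List.getElem_append_left (by simp; omega)]
        simp only [List.getElem_take]
      · have hge' : j + 1 ≤ i := by omega
        rw [List.getElem_append_right (by omega), List.getElem_append_right (by simp; omega)]
        simp only [List.getElem_drop]
        congr 1
        simp; omega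

lemma clamp_mod (x : Int) :
    PySem.Int.mod (if (if x > 255 then 255 else x) < 0 then 0 else (if x > 255 then 255 else x)) 256
    = min (max x 0) 255 := by
  have hm : ∀ v : Int, 0 ≤ v → v < 256 → PySem.Int.mod v 256 = v := fun v h1 h2 => by
    rw [PySem.Int.mod_eq_emod_of_pos (by norm_num)]; exact Int.emod_eq_of_lt h1 h2
  split_ifs with h1 h2 <;> rw [hm _ (by omega) (by omega)] <;> omega

lemma pySetD_neg_one_of_len (xs : List Int) (v : Int) (h : xs.length = 117) :
    PySem.List.pySetD xs (-1) v = xs.set 116 v := by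
  simp [PySem.List.pySetD, PySem.List.pySet?, h, PySem.List.pyIdx?]

lemma stepA_inv (p : List Int) (k : Nat) (hk : k ≤ p.length) :
    (p.take k).foldl convAStep (List.replicate 117 0, [])
    = ((List.range 117).map (fun (j : Nat) => altG p ((k : Int) - 117 + (j : Int))),
       (List.range k).map (fun (t : Nat) => min (max (altConv p (t : Int)) 0) 255)) := by
  induction k with
  | zero =>
    simp only [List.take_zero, List.foldl_nil, List.range_zero, List.map_nil]
    refine Prod.ext ?_ rfl
    simp only []
    symm
    rw [List.eq_replicate_iff]
    refine ⟨by simp, ?_⟩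
    intro x hx
    simp only [List.mem_map, List.mem_range] at hx
    obtain ⟨j, hj, rfl⟩ := hx
    rw [altG, if_neg (by omega)]
  | succ k ih =>
    have hk' : k ≤ p.length := Nat.le_of_succ_le hk
    rw [List.take_add_one, List.getElem?_eq_getElem (by omega), Option.toList_some,
        List.foldl_append, ih hk']
    simp only [List.foldl_cons, List.foldl_nil]
    set B := (List.range 117).map (fun (j : Nat) => altG p ((k : Int) - 117 + (j : Int))) with hB
    have hBlen : B.length = 117 := by simp [hB]
    have hBel : ∀ (i : Nat) (h : i < 117), B[i]'(by rw [hBlen]; omega) = altG p ((k : Int) - 117 + (i : Int)) := by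
      intro i h
      simp [hB]
    have hBget : ∀ (ni : Int) (n : Nat), ni = (n : Int) → n < 117 →
        PySem.List.pyGetD B ni 0 = altG p ((k : Int) - 117 + (n : Int)) := by
      intro ni n hni hn
      rw [hni, PySem.List.pyGetD_natCast, List.getD_eq_getElem _ _ (by omega), hBel n hn]
    rw [convAStep]
    simp only []
    rw [hBget (0*28+0) 0 (by norm_num) (by norm_num),
        hBget (1*28+1) 29 (by norm_num) (by norm_num),
        hBget (2*28+2) 58 (by norm_num) (by norm_num),
        hBget (3*28+3) 87 (by norm_num) (by norm_num),
        hBget (4*28+4) 116 (by norm_num) (by norm_num)]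
    have hconv : ([altG p ((k:Int) - 117 + ((0:Nat):Int)) * (-1), altG p ((k:Int) - 117 + ((29:Nat):Int)) * (-2),
        altG p ((k:Int) - 117 + ((58:Nat):Int)) * 6, altG p ((k:Int) - 117 + ((87:Nat):Int)) * (-2),
        altG p ((k:Int) - 117 + ((116:Nat):Int)) * (-1)]).sum = altConv p (k : Int) := by
      rw [altConv,
          show ((k:Int) - 117 + ((0:Nat):Int)) = (k:Int) - 117 by push_cast; ring,
          show ((k:Int) - 117 + ((29:Nat):Int)) = (k:Int) - 88 by push_cast; ring,
          show ((k:Int) - 117 + ((58:Nat):Int)) = (k:Int) - 59 by push_cast; ring,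
          show ((k:Int) - 117 + ((87:Nat):Int)) = (k:Int) - 30 by push_cast; ring,
          show ((k:Int) - 117 + ((116:Nat):Int)) = (k:Int) - 1 by push_cast; ring]
      simp only [List.sum_cons, List.sum_nil]
      ring
    rw [hconv]
    refine Prod.ext ?_ ?_
    · -- buffer component
      simp only []
      rw [PySem.List.len_eq, hBlen]
      norm_num
      rw [show (116:Int) = ((116:Nat):Int) by norm_num, shiftFold_aux B 116 (by omega)]
      rw [pySetD_neg_one_of_len _ _ (by simp [hBlen])]
      apply List.ext_getElem
      · simp [hBlen]
      intro i hi1 hi2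
      have hi : i < 117 := by simpa using hi2
      simp only [List.getElem_set, List.getElem_map, List.getElem_range]
      by_cases h116 : 116 = i
      · subst h116
        rw [if_pos rfl]
        have hpk : altG p ((k : Int) + 1 - 117 + ((116:Nat):Int)) = p[k]'(by omega) := by
          rw [altG, if_pos (by push_cast; omega),
              PySem.List.pyGetD_eq_getElem _ _ (by push_cast; omega) (by simp; omega)]
          congr 1
          push_cast; omega
        exact hpk.symm
      · rw [if_neg h116]
        have hilt : i < 116 := by omega
        rw [List.getElem_append_left (by simp [hBlen]; omega)]
        simp only [List.getElem_take, List.getElem_drop]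
        rw [hBel (1 + i) (by omega)]
        congr 1
        push_cast; ring
    · -- output component
      simp only []
      rw [clamp_mod, List.range_succ, List.map_append, List.map_cons, List.map_nil]

-- ===== VERDICT (by name: the statement is the Claim_ definition above) =====
theorem conv_kernel_spec : Claim_equal_conv_kernel := by
  intro p _
  unfold Spec_conv_kernel conv_kernel conv_kernel_alt
  have h := stepA_inv p p.length le_rfl
  rw [List.take_length] at h
  rw [show (List.replicate (28*(5-1)+5) (0:Int)) = List.replicate 117 0 from rfl, h]
  rw [PySem.List.foldl_append_singleton_eq_map, PySem.List.len_eq,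
      PySem.List.pyRange_zero_natCast]
  simp [List.map_map, Function.comp]
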